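-- pv_equiv track=rewrite | github.com/eliottcassidy2000/math | 04-computation/c3_constant_and_qr_parity.py | qr_pattern
-- ===== SOURCE A (Python) =====
-- p = 11
--
-- m = (p - 1) // 2
--
-- S_qr_set = set(j for j in range(1, p) if pow(j, (p-1)//2, p) == 1)
--
-- def qr_pattern(bits):
--     """Returns which pairs (1-indexed) pick the QR element."""
--     pattern = set()
--     for j in range(m):
--         if bits & (1 << j):
--             elem = j+1
--         else:
--             elem = p-(j+1)
--         if elem in S_qr_set:
--             pattern.add(j+1)
--     return frozenset(pattern)
-- ===== SOURCE B (Python) =====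
-- p = 11
--
-- m = (p - 1) // 2
--
-- S_qr_set = set(j for j in range(1, p) if pow(j, (p-1)//2, p) == 1)
--
-- # Precomputed at module load: bit j of QR_HI set iff j+1 is a QR; bit j of QR_LO set iff p-(j+1) is a QR.
-- QR_HI = sum(1 << j for j in range(m) if (j + 1) in S_qr_set)
-- QR_LO = sum(1 << j for j in range(m) if (p - (j + 1)) in S_qr_set)
-- LOW_MASK = (1 << m) - 1
--
-- def qr_pattern(bits):
--     """Returns which pairs (1-indexed) pick the QR element."""
--     low = bits & LOW_MASK
--     sel = (low & QR_HI) | (~low & LOW_MASK & QR_LO)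
--     return frozenset(j + 1 for j in range(m) if (sel >> j) & 1)
-- ===== Notes on version B (the rewrite author's own statement) =====
-- stated objective: alternative
-- what changed: Per-call membership tests against S_qr_set inside the loop are replaced by two module-level integer bitmasks (QR_HI/QR_LO) combined with bitwise algebra; qr_pattern just extracts the set bits of the combined selector.
import Mathlib
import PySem

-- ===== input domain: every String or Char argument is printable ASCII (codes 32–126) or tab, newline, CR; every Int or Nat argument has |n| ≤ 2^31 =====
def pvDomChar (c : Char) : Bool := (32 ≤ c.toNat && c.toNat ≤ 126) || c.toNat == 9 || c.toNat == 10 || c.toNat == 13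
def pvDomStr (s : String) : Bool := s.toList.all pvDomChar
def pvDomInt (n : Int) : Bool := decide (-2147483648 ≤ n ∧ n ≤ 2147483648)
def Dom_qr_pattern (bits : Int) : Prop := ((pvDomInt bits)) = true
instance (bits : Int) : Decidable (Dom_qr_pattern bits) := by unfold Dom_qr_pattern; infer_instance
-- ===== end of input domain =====

-- B replaces the per-iteration set-membership tests of A by two precomputed bitmasks combined with bitwise algebra (objective: alternative, same cost).

-- ===== PORT A =====
-- module constants: p = 11, m = (p - 1) // 2, S_qr_set = {j in 1..p-1 | pow(j, (p-1)//2, p) == 1}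
def pv_p : Int := 11
def pv_m : Int := PySem.Int.floordiv (pv_p - 1) 2
-- pow(j, e, p) ported as (j ^ e) % p: exact here since j ≥ 1 and e = (p-1)//2 ≥ 0
def pv_S_qr_set : List Int :=
  PySem.Set.ofList ((PySem.List.pyRange 1 pv_p 1).filter
    (fun j => PySem.Int.mod (j ^ (PySem.Int.floordiv (pv_p - 1) 2).toNat) pv_p == 1))

def qr_pattern (bits : Int) : List Int :=
  let pattern : List Int := PySem.Set.ofList []
  let pattern := (PySem.List.pyRange 0 pv_m 1).foldl (fun pattern j =>
    let elem : Int := if PySem.Int.band bits ((1 : Int) <<< j.toNat) ≠ 0 then j + 1 else pv_p - (j + 1)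
    if pv_S_qr_set.contains elem then PySem.Set.add pattern (j + 1) else pattern) pattern
  pattern  -- frozenset(pattern): already a set

-- ===== PORT B =====
-- module constants of Source B: QR_HI, QR_LO, LOW_MASK
def pv_QR_HI : Int :=
  (((PySem.List.pyRange 0 pv_m 1).filter (fun j => pv_S_qr_set.contains (j + 1))).map
    (fun j => (1 : Int) <<< j.toNat)).sum
def pv_QR_LO : Int :=
  (((PySem.List.pyRange 0 pv_m 1).filter (fun j => pv_S_qr_set.contains (pv_p - (j + 1)))).map
    (fun j => (1 : Int) <<< j.toNat)).sum
def pv_LOW_MASK : Int := ((1 : Int) <<< pv_m.toNat) - 1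

def qr_pattern_alt (bits : Int) : List Int :=
  let low := PySem.Int.band bits pv_LOW_MASK
  let sel := PySem.Int.bor (PySem.Int.band low pv_QR_HI)
    (PySem.Int.band (PySem.Int.band (Int.not low) pv_LOW_MASK) pv_QR_LO)
  ((PySem.List.pyRange 0 pv_m 1).filter
    (fun j => PySem.Int.band (sel >>> j.toNat) 1 ≠ 0)).map (fun j => j + 1)

-- ===== PRECONDITION & SPEC =====
def Spec_qr_pattern (bits : Int) (out : List Int) : Prop := out = qr_pattern_alt bits
instance (bits : Int) (out : List Int) : Decidable (Spec_qr_pattern bits out) := by unfold Spec_qr_pattern; infer_instance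

-- ===== CLAIM (what is proved, stated in full; the proofs are below) =====
def Claim_equal_qr_pattern : Prop := ∀ (bits : Int), Dom_qr_pattern bits → Spec_qr_pattern bits (qr_pattern bits)

-- ===== LEMMAS AND PROOFS =====

-- n &&& 2^j extracts bit j: expressed through mod
theorem pv_nat_and_two_pow (n j : Nat) : n &&& 2 ^ j = n % 2 ^ (j + 1) - n % 2 ^ j := by
  rw [Nat.and_two_pow, Nat.toNat_testBit]
  have h1 : n % 2 ^ (j + 1) = n % 2 ^ j + 2 ^ j * (n / 2 ^ j % 2) := by
    rw [pow_succ, Nat.mod_mul]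
  have h2 : n % 2 ^ j < 2 ^ j := Nat.mod_lt _ (by positivity)
  rcases Nat.mod_two_eq_zero_or_one (n / 2 ^ j) with h | h <;>
    rw [h] at h1 ⊢ <;> simp at h1 ⊢ <;> omega

theorem pv_band_lit1 (a : Int) : PySem.Int.band a 1 = a % 2 - a % 1 := by
  rcases a with n | n
  · simp only [PySem.Int.band, Int.ofNat_eq_natCast]
    rw [if_pos (by positivity), if_pos (by norm_num), Int.toNat_natCast,
        show (((1:Int)).toNat) = 1 from rfl]
    have h := pv_nat_and_two_pow n 0
    simp only [pow_zero] at h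
    omega
  · simp only [PySem.Int.band]
    rw [if_neg (by rw [Int.negSucc_eq]; omega), if_pos (by norm_num)]
    have e0 : (-(Int.negSucc n) - 1).toNat = n := by rw [Int.negSucc_eq]; omega
    rw [e0, show (((1:Int)).toNat) = 1 from rfl]
    have hc : 1 &&& n = n &&& 1 := Nat.land_comm 1 n
    rw [hc]
    have h := pv_nat_and_two_pow n 0
    simp only [pow_zero] at h
    rw [Int.negSucc_eq]
    omega

theorem pv_band_lit2 (a : Int) : PySem.Int.band a 2 = a % 4 - a % 2 := by
  rcases a with n | n
  · simp only [PySem.Int.band, Int.ofNat_eq_natCast]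
    rw [if_pos (by positivity), if_pos (by norm_num), Int.toNat_natCast,
        show (((2:Int)).toNat) = 2 from rfl]
    have h := pv_nat_and_two_pow n 1
    norm_num at h
    omega
  · simp only [PySem.Int.band]
    rw [if_neg (by rw [Int.negSucc_eq]; omega), if_pos (by norm_num)]
    have e0 : (-(Int.negSucc n) - 1).toNat = n := by rw [Int.negSucc_eq]; omega
    rw [e0, show (((2:Int)).toNat) = 2 from rfl]
    have hc : 2 &&& n = n &&& 2 := Nat.land_comm 2 n
    rw [hc]
    have h := pv_nat_and_two_pow n 1
    norm_num at h
    rw [Int.negSucc_eq]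
    omega

theorem pv_band_lit4 (a : Int) : PySem.Int.band a 4 = a % 8 - a % 4 := by
  rcases a with n | n
  · simp only [PySem.Int.band, Int.ofNat_eq_natCast]
    rw [if_pos (by positivity), if_pos (by norm_num), Int.toNat_natCast,
        show (((4:Int)).toNat) = 4 from rfl]
    have h := pv_nat_and_two_pow n 2
    norm_num at h
    omega
  · simp only [PySem.Int.band]
    rw [if_neg (by rw [Int.negSucc_eq]; omega), if_pos (by norm_num)]
    have e0 : (-(Int.negSucc n) - 1).toNat = n := by rw [Int.negSucc_eq]; omega
    rw [e0, show (((4:Int)).toNat) = 4 from rfl]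
    have hc : 4 &&& n = n &&& 4 := Nat.land_comm 4 n
    rw [hc]
    have h := pv_nat_and_two_pow n 2
    norm_num at h
    rw [Int.negSucc_eq]
    omega

theorem pv_band_lit8 (a : Int) : PySem.Int.band a 8 = a % 16 - a % 8 := by
  rcases a with n | n
  · simp only [PySem.Int.band, Int.ofNat_eq_natCast]
    rw [if_pos (by positivity), if_pos (by norm_num), Int.toNat_natCast,
        show (((8:Int)).toNat) = 8 from rfl]
    have h := pv_nat_and_two_pow n 3
    norm_num at h
    omega
  · simp only [PySem.Int.band]
    rw [if_neg (by rw [Int.negSucc_eq]; omega), if_pos (by norm_num)]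
    have e0 : (-(Int.negSucc n) - 1).toNat = n := by rw [Int.negSucc_eq]; omega
    rw [e0, show (((8:Int)).toNat) = 8 from rfl]
    have hc : 8 &&& n = n &&& 8 := Nat.land_comm 8 n
    rw [hc]
    have h := pv_nat_and_two_pow n 3
    norm_num at h
    rw [Int.negSucc_eq]
    omega

theorem pv_band_lit16 (a : Int) : PySem.Int.band a 16 = a % 32 - a % 16 := by
  rcases a with n | n
  · simp only [PySem.Int.band, Int.ofNat_eq_natCast]
    rw [if_pos (by positivity), if_pos (by norm_num), Int.toNat_natCast,
        show (((16:Int)).toNat) = 16 from rfl]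
    have h := pv_nat_and_two_pow n 4
    norm_num at h
    omega
  · simp only [PySem.Int.band]
    rw [if_neg (by rw [Int.negSucc_eq]; omega), if_pos (by norm_num)]
    have e0 : (-(Int.negSucc n) - 1).toNat = n := by rw [Int.negSucc_eq]; omega
    rw [e0, show (((16:Int)).toNat) = 16 from rfl]
    have hc : 16 &&& n = n &&& 16 := Nat.land_comm 16 n
    rw [hc]
    have h := pv_nat_and_two_pow n 4
    norm_num at h
    rw [Int.negSucc_eq]
    omega

theorem pv_band_lit31 (a : Int) : PySem.Int.band a 31 = a % 32 := by
  rcases a with n | n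
  · simp only [PySem.Int.band, Int.ofNat_eq_natCast]
    rw [if_pos (by positivity), if_pos (by norm_num), Int.toNat_natCast,
        show (((31:Int)).toNat) = 31 from rfl]
    have h := Nat.and_two_pow_sub_one_eq_mod n 5
    norm_num at h
    omega
  · simp only [PySem.Int.band]
    rw [if_neg (by rw [Int.negSucc_eq]; omega), if_pos (by norm_num)]
    have e0 : (-(Int.negSucc n) - 1).toNat = n := by rw [Int.negSucc_eq]; omega
    rw [e0, show (((31:Int)).toNat) = 31 from rfl]
    have hc : 31 &&& n = n &&& 31 := Nat.land_comm 31 n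
    rw [hc]
    have h := Nat.and_two_pow_sub_one_eq_mod n 5
    norm_num at h
    rw [Int.negSucc_eq]
    omega

-- every bit test used by the ports depends only on a % 32
theorem pv_band_mod1 (a : Int) : PySem.Int.band a 1 = PySem.Int.band (a % 32) 1 := by
  rw [pv_band_lit1, pv_band_lit1]; omega
theorem pv_band_mod2 (a : Int) : PySem.Int.band a 2 = PySem.Int.band (a % 32) 2 := by
  rw [pv_band_lit2, pv_band_lit2]; omega
theorem pv_band_mod4 (a : Int) : PySem.Int.band a 4 = PySem.Int.band (a % 32) 4 := by
  rw [pv_band_lit4, pv_band_lit4]; omega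
theorem pv_band_mod8 (a : Int) : PySem.Int.band a 8 = PySem.Int.band (a % 32) 8 := by
  rw [pv_band_lit8, pv_band_lit8]; omega
theorem pv_band_mod16 (a : Int) : PySem.Int.band a 16 = PySem.Int.band (a % 32) 16 := by
  rw [pv_band_lit16, pv_band_lit16]; omega
theorem pv_band_mod31 (a : Int) : PySem.Int.band a 31 = PySem.Int.band (a % 32) 31 := by
  rw [pv_band_lit31, pv_band_lit31]; omega

theorem pv_A_mod (bits : Int) : qr_pattern bits = qr_pattern (bits % 32) := by
  unfold qr_pattern
  have hr : PySem.List.pyRange 0 pv_m 1 = [0, 1, 2, 3, 4] := by decide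
  rw [hr]
  simp only [List.foldl,
    show ((1:Int) <<< (((0:Int)).toNat : Int)) = 1 from rfl,
    show ((1:Int) <<< (((1:Int)).toNat : Int)) = 2 from rfl,
    show ((1:Int) <<< (((2:Int)).toNat : Int)) = 4 from rfl,
    show ((1:Int) <<< (((3:Int)).toNat : Int)) = 8 from rfl,
    show ((1:Int) <<< (((4:Int)).toNat : Int)) = 16 from rfl]
  rw [pv_band_mod1 bits, pv_band_mod2 bits, pv_band_mod4 bits, pv_band_mod8 bits,
      pv_band_mod16 bits]

theorem pv_B_mod (bits : Int) : qr_pattern_alt bits = qr_pattern_alt (bits % 32) := by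
  unfold qr_pattern_alt
  have hm : pv_LOW_MASK = 31 := by decide
  rw [hm, pv_band_mod31 bits]

theorem pv_small (r : Int) (h0 : 0 <= r) (h1 : r < 32) : qr_pattern r = qr_pattern_alt r := by
  interval_cases r <;> decide

-- ===== VERDICT (by name: the statement is the Claim_ definition above) =====
theorem qr_pattern_spec : Claim_equal_qr_pattern := by
  intro bits _
  unfold Spec_qr_pattern
  rw [pv_A_mod bits, pv_B_mod bits]
  exact pv_small _ (Int.emod_nonneg _ (by norm_num)) (by omega)
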